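-- pv_equiv track=rewrite | github.com/lkpetrich/Preference-Voting | PrefVote.py | MaximalSetIndices
-- ===== SOURCE A (Python) =====
-- def MaximalSetIndices(PrefMat, Type):
-- 	n = len(PrefMat)
--
-- 	# Init HasPath for relations with length 1
-- 	HasPath = [n*[False] for k in range(n)]
-- 	for k1 in range(n):
-- 		for k2 in range(n):
-- 			if k2 != k1:
-- 				if Type == "Schwartz":
-- 					HasPath[k1][k2] = PrefMat[k1][k2] > PrefMat[k2][k1]
-- 				elif Type == "Smith":
-- 					HasPath[k1][k2] = PrefMat[k1][k2] >= PrefMat[k2][k1]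
--
-- 	# Consider paths with intermediate nodes from 1 to k
-- 	for k in range(n):
-- 		for k1 in range(n):
-- 			if k1 != k:
-- 				for k2 in range(n):
-- 					if k2 != k and k2 != k1:
-- 						if HasPath[k1][k] and HasPath[k][k2]:
-- 							HasPath[k1][k2] = True
--
-- 	# Candidates with paths to them but none to complete a cycle,
-- 	# they are not in the maximal set
-- 	InMaximal = n*[True]
-- 	for k1 in range(n):
-- 		for k2 in range(n):
-- 			if k2 != k1:
-- 				if HasPath[k2][k1] and not HasPath[k1][k2]:
-- 					InMaximal[k1] = False
--
-- 	# Find indices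
-- 	return tuple((im[0] for im in zip(range(n),InMaximal) if im[1]))
-- ===== SOURCE B (Python) =====
-- # Different algorithm: per-candidate DFS reachability on an adjacency-list beat graph
-- # instead of Floyd-Warshall closure; same result.
-- def MaximalSetIndices(PrefMat, Type):
--     n = len(PrefMat)
--     if Type == "Schwartz":
--         adj = [[j for j in range(n) if j != i and PrefMat[i][j] > PrefMat[j][i]]
--                for i in range(n)]
--     elif Type == "Smith":
--         adj = [[j for j in range(n) if j != i and PrefMat[i][j] >= PrefMat[j][i]]
--                for i in range(n)]
--     else:
--         adj = [[] for i in range(n)]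
--
--     def reach(s):
--         # seen[j] == there is a path of length >= 1 from s to j
--         seen = [False] * n
--         stack = list(adj[s])
--         while stack:
--             v = stack.pop()
--             if not seen[v]:
--                 seen[v] = True
--                 stack.extend(adj[v])
--         return seen
--
--     R = [reach(i) for i in range(n)]
--     return tuple(i for i in range(n)
--                  if all(R[i][j] or not R[j][i] for j in range(n)))
-- ===== Notes on version B (the rewrite author's own statement) =====
-- stated objective: faster
-- what changed: Replaces A's Floyd-Warshall Theta(n^3) transitive-closure loops by adjacency lists plus one explicit-stack DFS per candidate (O(n*(n+m)) total), keeping the same maximal-set test on the reachability relation.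
import Mathlib
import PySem

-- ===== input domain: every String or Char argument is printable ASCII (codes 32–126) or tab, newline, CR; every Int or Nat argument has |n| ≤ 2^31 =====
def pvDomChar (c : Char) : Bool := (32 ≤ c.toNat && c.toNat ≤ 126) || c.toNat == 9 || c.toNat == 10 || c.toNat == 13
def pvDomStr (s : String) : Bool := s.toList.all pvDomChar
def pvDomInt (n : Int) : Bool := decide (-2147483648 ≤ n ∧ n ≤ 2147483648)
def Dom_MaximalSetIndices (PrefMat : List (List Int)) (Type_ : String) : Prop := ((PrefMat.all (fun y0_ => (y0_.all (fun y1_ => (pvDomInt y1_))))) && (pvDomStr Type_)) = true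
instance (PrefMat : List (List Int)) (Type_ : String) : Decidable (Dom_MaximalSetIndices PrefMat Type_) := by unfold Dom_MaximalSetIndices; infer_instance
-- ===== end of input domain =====

-- B replaces A's Θ(n^3) Floyd–Warshall path closure by one explicit-stack DFS per candidate
-- over an adjacency-list beat graph, O(n·(n+m)); same return value (measured faster).

-- ===== PORT A =====
-- shared low-level accessors: PrefMat[i][j] (in range by Pre_), HasPath[i][j] read / write
def pmGet (PrefMat : List (List Int)) (i j : Nat) : Int := (PrefMat.getD i []).getD j 0
def mget (H : List (List Bool)) (i j : Nat) : Bool := (H.getD i []).getD j false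
def mset (H : List (List Bool)) (i j : Nat) (b : Bool) : List (List Bool) :=
  H.set i ((H.getD i []).set j b)

-- HasPath = [n*[False] for k in range(n)] and the init double loop of A
def msiInit (PrefMat : List (List Int)) (Type_ : String) : List (List Bool) :=
  let n := PrefMat.length
  (List.range n).foldl (fun H k1 =>
    (List.range n).foldl (fun H k2 =>
      if k2 ≠ k1 then
        if Type_ = "Schwartz" then mset H k1 k2 (decide (pmGet PrefMat k2 k1 < pmGet PrefMat k1 k2))
        else if Type_ = "Smith" then mset H k1 k2 (decide (pmGet PrefMat k2 k1 ≤ pmGet PrefMat k1 k2))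
        else H
      else H) H) ((List.range n).map (fun _ => List.replicate n false))

-- A's Floyd–Warshall triple loop
def msiFW (n : Nat) (H0 : List (List Bool)) : List (List Bool) :=
  (List.range n).foldl (fun H k =>
    (List.range n).foldl (fun H k1 =>
      if k1 ≠ k then
        (List.range n).foldl (fun H k2 =>
          if k2 ≠ k ∧ k2 ≠ k1 then
            (if mget H k1 k && mget H k k2 then mset H k1 k2 true else H)
          else H) H
      else H) H) H0

-- A's InMaximal double loop
def msiIM (n : Nat) (H2 : List (List Bool)) : List Bool :=
  (List.range n).foldl (fun IM k1 =>
    (List.range n).foldl (fun IM k2 =>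
      if k2 ≠ k1 then
        (if mget H2 k2 k1 && !(mget H2 k1 k2) then IM.set k1 false else IM)
      else IM) IM) (List.replicate n true)

def MaximalSetIndices (PrefMat : List (List Int)) (Type_ : String) : List Int :=
  let n := PrefMat.length
  let H2 := msiFW n (msiInit PrefMat Type_)
  let IM := msiIM n H2
  -- tuple(im[0] for im in zip(range(n),InMaximal) if im[1])
  (((List.range n).zip IM).filter (fun p => p.2)).map (fun p => (p.1 : Int))

-- ===== PORT B =====
-- adjacency lists of the beat graph (the three comprehension branches of Source B)
def msiAdj (PrefMat : List (List Int)) (Type_ : String) : List (List Nat) :=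
  let n := PrefMat.length
  if Type_ = "Schwartz" then
    (List.range n).map (fun i => (List.range n).filter
      (fun j => decide (j ≠ i) && decide (pmGet PrefMat j i < pmGet PrefMat i j)))
  else if Type_ = "Smith" then
    (List.range n).map (fun i => (List.range n).filter
      (fun j => decide (j ≠ i) && decide (pmGet PrefMat j i ≤ pmGet PrefMat i j)))
  else (List.range n).map (fun _ => ([] : List Nat))

-- termination helper for the DFS worklist loop
theorem msiCountFalseSetTrue (l : List Bool) (v : Nat) (h : v < l.length)
    (hf : l.getD v false = false) : (l.set v true).count false < l.count false := by
  induction l generalizing v with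
  | nil => simp at h
  | cons a t ih =>
    cases v with
    | zero => simp [List.getD] at hf; subst hf; simp
    | succ v =>
      simp only [List.set_cons_succ, List.count_cons]
      have := ih v (by simpa using h) (by simpa [List.getD] using hf)
      omega

-- Source B's `while stack:` DFS; the Python stack is held top-first (list.pop / extend at the top);
-- the `v < seen.length` test only makes the recursion structurally total (it holds on all inputs used).
def msiDfs (adj : List (List Nat)) : List Nat → List Bool → List Bool
  | [], seen => seen
  | v :: stack, seen =>
    if seen.getD v false then msiDfs adj stack seen
    else if _h : v < seen.length then
      msiDfs adj ((adj.getD v []).reverse ++ stack) (seen.set v true)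
    else msiDfs adj stack seen
termination_by stack seen => (seen.count false, stack.length)
decreasing_by
  · exact Prod.Lex.right _ (by simp)
  · exact Prod.Lex.left _ _ (msiCountFalseSetTrue _ _ _h (by simp_all [List.getD]))
  · exact Prod.Lex.right _ (by simp)

-- R = [reach(i) for i in range(n)]
def msiReach (adj : List (List Nat)) (n : Nat) : List (List Bool) :=
  (List.range n).map (fun s => msiDfs adj ((adj.getD s []).reverse) (List.replicate n false))

def MaximalSetIndices_alt (PrefMat : List (List Int)) (Type_ : String) : List Int :=
  let n := PrefMat.length
  let R := msiReach (msiAdj PrefMat Type_) n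
  ((List.range n).filter (fun i =>
      (List.range n).all (fun j => mget R i j || !(mget R j i)))).map (fun (i : Nat) => (i : Int))

-- ===== PRECONDITION & SPEC =====
-- Pre_ excludes exactly the inputs where Python A raises an IndexError: when Type is
-- "Schwartz"/"Smith", A reads PrefMat[i][j] for every pair i ≠ j below n = len(PrefMat), so each
-- such entry must exist; for any other Type A never indexes into the rows and is total.
def Pre_MaximalSetIndices (PrefMat : List (List Int)) (Type_ : String) : Prop :=
  (Type_ = "Schwartz" ∨ Type_ = "Smith") →
    ∀ i ∈ List.range PrefMat.length, ∀ j ∈ List.range PrefMat.length,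
      j ≠ i → j < (PrefMat.getD i []).length
instance (PrefMat : List (List Int)) (Type_ : String) : Decidable (Pre_MaximalSetIndices PrefMat Type_) := by
  unfold Pre_MaximalSetIndices; infer_instance
def pvWitness_MaximalSetIndices : List (List Int) × String := ([[0, 2], [1, 0]], "Smith")

def Spec_MaximalSetIndices (PrefMat : List (List Int)) (Type_ : String) (out : List Int) : Prop := out = MaximalSetIndices_alt PrefMat Type_
instance (PrefMat : List (List Int)) (Type_ : String) (out : List Int) : Decidable (Spec_MaximalSetIndices PrefMat Type_ out) := by unfold Spec_MaximalSetIndices; infer_instance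

-- ===== CLAIM (what is proved, stated in full; the proofs are below) =====
def Claim_equal_MaximalSetIndices : Prop := ∀ (PrefMat : List (List Int)) (Type_ : String), Dom_MaximalSetIndices PrefMat Type_ → Pre_MaximalSetIndices PrefMat Type_ → Spec_MaximalSetIndices PrefMat Type_ (MaximalSetIndices PrefMat Type_)

-- ===== LEMMAS AND PROOFS =====

-- the beat-graph edge relation both programs are about
def msiE (PrefMat : List (List Int)) (Type_ : String) (i j : Nat) : Prop :=
  j ∈ (msiAdj PrefMat Type_).getD i []

-- well-formed n×n boolean matrix
def msiWF (H : List (List Bool)) (n : Nat) : Prop := H.length = n ∧ ∀ r ∈ H, r.length = n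

-- Floyd–Warshall level semantics: msiIter l P = "P-paths whose intermediate nodes come from l"
def msiIter (l : List Nat) (P : Nat → Nat → Prop) : Nat → Nat → Prop :=
  match l with
  | [] => P
  | k :: t => msiIter t (fun i j => P i j ∨ (i ≠ j ∧ P i k ∧ P k j))

-- chains i →E u1 →E … →E j with the list of intermediate nodes explicit
inductive msiChain (E : Nat → Nat → Prop) : Nat → List Nat → Nat → Prop
  | nil {i j : Nat} : E i j → msiChain E i [] j
  | cons {i u j : Nat} {l : List Nat} : E i u → msiChain E u l j → msiChain E i (u :: l) j

-- ---- matrix access basics ----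
theorem msiGetDset_self {α : Type} (l : List α) (k : Nat) (x : α) (d : α) (h : k < l.length) :
    (l.set k x).getD k d = x := by
  simp only [List.getD, List.getElem?_set_self h, Option.getD_some]

theorem msiGetDset_ne {α : Type} (l : List α) (k : Nat) (x : α) (k' : Nat) (d : α) (h : k' ≠ k) :
    (l.set k x).getD k' d = l.getD k' d := by
  simp only [List.getD, List.getElem?_set_ne (Ne.symm h)]

theorem msiGetD_out {α : Type} (l : List α) (k : Nat) (d : α) (h : l.length ≤ k) :
    l.getD k d = d := by
  simp only [List.getD, List.getElem?_eq_none h, Option.getD_none]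

theorem msiRowLen (H : List (List Bool)) (n i : Nat) (hWF : msiWF H n) (hi : i < n) :
    (H.getD i []).length = n := by
  obtain ⟨hlen, hrows⟩ := hWF
  have h : H.getD i [] = H[i]'(by omega) := by
    simp only [List.getD, List.getElem?_eq_getElem (show i < H.length by omega)]; rfl
  rw [h]; exact hrows _ (List.getElem_mem _)

theorem getD_map_range' {α : Type} (f : Nat → α) (n i : Nat) (d : α) :
    ((List.range n).map f).getD i d = if i < n then f i else d := by
  simp only [List.getD, List.getElem?_map]
  split_ifs with h
  · simp [List.getElem?_range h]
  · rw [List.getElem?_eq_none (by simpa using Nat.le_of_not_lt h)]; rfl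

theorem mget_mset_ne (H : List (List Bool)) (i j : Nat) (b : Bool) (i' j' : Nat)
    (h : i' ≠ i ∨ j' ≠ j) : mget (mset H i j b) i' j' = mget H i' j' := by
  simp only [mget, mset]
  by_cases hii : i' = i
  · subst hii
    have hj : j' ≠ j := h.resolve_left (by simp)
    by_cases hi : i' < H.length
    · rw [msiGetDset_self _ _ _ _ hi, msiGetDset_ne _ _ _ _ _ hj]
    · rw [List.set_eq_of_length_le (by omega)]
  · rw [msiGetDset_ne _ _ _ _ _ hii]

theorem mget_mset_self (H : List (List Bool)) (n i j : Nat) (b : Bool)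
    (hWF : msiWF H n) (hi : i < n) (hj : j < n) : mget (mset H i j b) i j = b := by
  have hrow := msiRowLen H n i hWF hi
  obtain ⟨hlen, _⟩ := hWF
  simp only [mget, mset]
  rw [msiGetDset_self _ _ _ _ (by omega), msiGetDset_self _ _ _ _ (by omega)]

theorem msiWF_mset (H : List (List Bool)) (n i j : Nat) (b : Bool)
    (hWF : msiWF H n) : msiWF (mset H i j b) n := by
  obtain ⟨hlen, hrows⟩ := hWF
  refine ⟨by simp [mset, hlen], ?_⟩
  intro r hr
  by_cases hi : i < n
  · rcases List.mem_or_eq_of_mem_set hr with h | h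
    · exact hrows _ h
    · subst h
      rw [List.length_set]
      exact msiRowLen H n i ⟨hlen, hrows⟩ hi
  · rw [mset, List.set_eq_of_length_le (by omega)] at hr
    exact hrows _ hr

theorem mget_true_bounds (H : List (List Bool)) (n i j : Nat)
    (hWF : msiWF H n) (h : mget H i j = true) : i < n ∧ j < n := by
  obtain ⟨hlen, hrows⟩ := hWF
  by_contra hc
  rw [not_and_or] at hc
  rcases hc with hc | hc
  · rw [mget, msiGetD_out H i [] (by omega)] at h
    simp [List.getD] at h
  · by_cases hi : i < n
    · have hrow := msiRowLen H n i ⟨hlen, hrows⟩ hi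
      rw [mget, msiGetD_out (H.getD i []) j false (by omega)] at h; simp at h
    · rw [mget, msiGetD_out H i [] (by omega)] at h
      simp [List.getD] at h

-- ---- phase 1: the init double loop writes the edge indicator ----
theorem msiInit_inner (n : Nat) (val : Nat → Bool) (k1 : Nat) (hk1 : k1 < n) :
    ∀ (l : List Nat) (H : List (List Bool)), (∀ x ∈ l, x < n) → msiWF H n →
      msiWF (l.foldl (fun H k2 => if k2 ≠ k1 then mset H k1 k2 (val k2) else H) H) n ∧
      ∀ i j, mget (l.foldl (fun H k2 => if k2 ≠ k1 then mset H k1 k2 (val k2) else H) H) i j =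
        if i = k1 ∧ j ∈ l ∧ j ≠ k1 then val j else mget H i j := by
  intro l
  induction l with
  | nil =>
    intro H _ hWF
    exact ⟨hWF, fun i j => by simp⟩
  | cons k2 l ih =>
    intro H hl hWF
    rw [List.foldl_cons]
    by_cases hk2 : k2 = k1
    · have hstep : (if k2 ≠ k1 then mset H k1 k2 (val k2) else H) = H := by
        simp [hk2]
      rw [hstep]
      obtain ⟨hWF', hchar⟩ := ih H (fun x hx => hl x (by simp [hx])) hWF
      refine ⟨hWF', fun i j => ?_⟩
      rw [hchar i j]
      have hcond : (i = k1 ∧ j ∈ l ∧ j ≠ k1) ↔ (i = k1 ∧ j ∈ k2 :: l ∧ j ≠ k1) := by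
        subst hk2; simp only [List.mem_cons]; tauto
      exact if_congr hcond rfl rfl
    · have hstep : (if k2 ≠ k1 then mset H k1 k2 (val k2) else H) = mset H k1 k2 (val k2) := by
        simp [hk2]
      rw [hstep]
      have hk2n : k2 < n := hl k2 (by simp)
      obtain ⟨hWF', hchar⟩ := ih (mset H k1 k2 (val k2)) (fun x hx => hl x (by simp [hx]))
        (msiWF_mset H n k1 k2 (val k2) hWF)
      refine ⟨hWF', fun i j => ?_⟩
      rw [hchar i j]
      by_cases h1 : i = k1 ∧ j ∈ l ∧ j ≠ k1
      · rw [if_pos h1, if_pos ⟨h1.1, by simp [h1.2.1], h1.2.2⟩]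
      · rw [if_neg h1]
        by_cases h2 : i = k1 ∧ j ∈ k2 :: l ∧ j ≠ k1
        · rw [if_pos h2]
          obtain ⟨hi, hj, hjk1⟩ := h2
          have hjk2 : j = k2 := by
            rcases List.mem_cons.mp hj with h | h
            · exact h
            · exact absurd ⟨hi, h, hjk1⟩ h1
          rw [hi, hjk2]
          exact mget_mset_self H n k1 k2 (val k2) hWF hk1 hk2n
        · rw [if_neg h2]
          apply mget_mset_ne
          by_cases hi : i = k1
          · right
            intro hj
            exact h2 ⟨hi, by simp [hj], by rw [hj]; exact hk2⟩
          · left; exact hi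

theorem msiInit_outer (n : Nat) (val : Nat → Nat → Bool) :
    ∀ (l : List Nat) (H : List (List Bool)), (∀ x ∈ l, x < n) → msiWF H n →
      msiWF (l.foldl (fun H k1 => (List.range n).foldl
          (fun H k2 => if k2 ≠ k1 then mset H k1 k2 (val k1 k2) else H) H) H) n ∧
      ∀ i j, mget (l.foldl (fun H k1 => (List.range n).foldl
          (fun H k2 => if k2 ≠ k1 then mset H k1 k2 (val k1 k2) else H) H) H) i j =
        if i ∈ l ∧ j < n ∧ j ≠ i then val i j else mget H i j := by
  intro l
  induction l with
  | nil =>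
    intro H _ hWF
    exact ⟨hWF, fun i j => by simp⟩
  | cons k1 l ih =>
    intro H hl hWF
    rw [List.foldl_cons]
    have hk1 : k1 < n := hl k1 (by simp)
    obtain ⟨hWF1, hchar1⟩ := msiInit_inner n (val k1) k1 hk1 (List.range n) H
      (fun x hx => List.mem_range.mp hx) hWF
    obtain ⟨hWF', hchar⟩ := ih _ (fun x hx => hl x (by simp [hx])) hWF1
    refine ⟨hWF', fun i j => ?_⟩
    rw [hchar i j]
    by_cases h1 : i ∈ l ∧ j < n ∧ j ≠ i
    · rw [if_pos h1, if_pos ⟨by simp [h1.1], h1.2⟩]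
    · rw [if_neg h1, hchar1 i j]
      by_cases h2 : i ∈ k1 :: l ∧ j < n ∧ j ≠ i
      · rw [if_pos h2]
        obtain ⟨hi, hj, hji⟩ := h2
        have hik1 : i = k1 := by
          rcases List.mem_cons.mp hi with h | h
          · exact h
          · exact absurd ⟨h, hj, hji⟩ h1
        subst hik1
        rw [if_pos ⟨rfl, List.mem_range.mpr hj, hji⟩]
      · rw [if_neg h2, if_neg ?_]
        rintro ⟨hi, hj, hji⟩
        exact h2 ⟨by simp [hi], List.mem_range.mp hj, by simp only [hi]; exact hji⟩

theorem msiFoldlConst {α β : Type} (l : List β) (H : α) : l.foldl (fun H _ => H) H = H := by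
  induction l generalizing H with
  | nil => rfl
  | cons a l ih => exact ih H

theorem msiWF_H0 (n : Nat) : msiWF ((List.range n).map (fun _ => List.replicate n false)) n := by
  refine ⟨by simp, ?_⟩
  intro r hr
  rcases List.mem_map.mp hr with ⟨x, _, rfl⟩
  simp

theorem mget_H0 (n i j : Nat) : mget ((List.range n).map (fun _ => List.replicate n false)) i j = false := by
  rw [mget, getD_map_range']
  split_ifs with hi
  · rcases Nat.lt_or_ge j n with hj | hj
    · simp [List.getD, hj]
    · rw [msiGetD_out _ _ _ (by simpa using hj)]
  · rfl

theorem msiE_iff (PrefMat : List (List Int)) (Type_ : String) (i j : Nat) :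
    msiE PrefMat Type_ i j ↔ (i < PrefMat.length ∧ j < PrefMat.length ∧ j ≠ i ∧
      ((Type_ = "Schwartz" ∧ pmGet PrefMat j i < pmGet PrefMat i j) ∨
       (Type_ ≠ "Schwartz" ∧ Type_ = "Smith" ∧ pmGet PrefMat j i ≤ pmGet PrefMat i j))) := by
  unfold msiE msiAdj
  by_cases h1 : Type_ = "Schwartz"
  · simp only [h1, reduceIte, String.reduceEq]
    rw [getD_map_range']
    split_ifs with hi
    · simp only [List.mem_filter, List.mem_range, Bool.and_eq_true, decide_eq_true_eq]
      constructor
      · rintro ⟨hj, hne, hlt⟩; exact ⟨hi, hj, hne, Or.inl ⟨by trivial, hlt⟩⟩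
      · rintro ⟨_, hj, hne, h⟩
        rcases h with ⟨_, hlt⟩ | ⟨hc, _, _⟩
        · exact ⟨hj, hne, hlt⟩
        · exact absurd rfl hc
    · simp [hi]
  · rw [if_neg h1]
    by_cases h2 : Type_ = "Smith"
    · simp only [h2, reduceIte, String.reduceEq]
      rw [getD_map_range']
      split_ifs with hi
      · simp only [List.mem_filter, List.mem_range, Bool.and_eq_true, decide_eq_true_eq]
        constructor
        · rintro ⟨hj, hne, hle⟩; exact ⟨hi, hj, hne, Or.inr ⟨by decide, by trivial, hle⟩⟩
        · rintro ⟨_, hj, hne, h⟩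
          rcases h with ⟨hc, _⟩ | ⟨_, _, hle⟩
          · exact absurd hc (by decide)
          · exact ⟨hj, hne, hle⟩
      · simp [hi]
    · rw [if_neg h2, getD_map_range']
      split_ifs with hi <;> simp [h1, h2]

theorem msiInit_WF (PrefMat : List (List Int)) (Type_ : String) :
    msiWF (msiInit PrefMat Type_) PrefMat.length := by
  unfold msiInit
  by_cases h1 : Type_ = "Schwartz"
  · simp only [h1, reduceIte, String.reduceEq]
    exact (msiInit_outer PrefMat.length
      (fun k1 k2 => decide (pmGet PrefMat k2 k1 < pmGet PrefMat k1 k2)) (List.range PrefMat.length)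
      _ (fun x hx => List.mem_range.mp hx) (msiWF_H0 _)).1
  · by_cases h2 : Type_ = "Smith"
    · simp only [h2, reduceIte, String.reduceEq]
      exact (msiInit_outer PrefMat.length
        (fun k1 k2 => decide (pmGet PrefMat k2 k1 ≤ pmGet PrefMat k1 k2)) (List.range PrefMat.length)
        _ (fun x hx => List.mem_range.mp hx) (msiWF_H0 _)).1
    · simp only [if_neg h1, if_neg h2, ite_self, msiFoldlConst]
      exact msiWF_H0 _

theorem msiInit_char (PrefMat : List (List Int)) (Type_ : String) :
    ∀ i j, mget (msiInit PrefMat Type_) i j = true ↔ msiE PrefMat Type_ i j := by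
  intro i j
  rw [msiE_iff]
  unfold msiInit
  by_cases h1 : Type_ = "Schwartz"
  · simp only [h1, reduceIte, String.reduceEq]
    rw [(msiInit_outer PrefMat.length
      (fun k1 k2 => decide (pmGet PrefMat k2 k1 < pmGet PrefMat k1 k2)) (List.range PrefMat.length)
      _ (fun x hx => List.mem_range.mp hx) (msiWF_H0 _)).2 i j]
    split_ifs with hc
    · simp only [decide_eq_true_eq]
      constructor
      · intro hlt
        exact ⟨List.mem_range.mp hc.1, hc.2.1, hc.2.2, Or.inl ⟨by trivial, hlt⟩⟩
      · rintro ⟨_, _, _, h⟩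
        rcases h with ⟨_, hlt⟩ | ⟨hneq, _, _⟩
        · exact hlt
        · exact absurd rfl hneq
    · rw [mget_H0]
      simp only [Bool.false_eq_true, false_iff]
      rintro ⟨hi, hj, hne, _⟩
      exact hc ⟨List.mem_range.mpr hi, hj, hne⟩
  · by_cases h2 : Type_ = "Smith"
    · simp only [h2, reduceIte, String.reduceEq]
      rw [(msiInit_outer PrefMat.length
        (fun k1 k2 => decide (pmGet PrefMat k2 k1 ≤ pmGet PrefMat k1 k2)) (List.range PrefMat.length)
        _ (fun x hx => List.mem_range.mp hx) (msiWF_H0 _)).2 i j]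
      split_ifs with hc
      · simp only [decide_eq_true_eq]
        constructor
        · intro hle
          exact ⟨List.mem_range.mp hc.1, hc.2.1, hc.2.2,
            Or.inr ⟨by decide, by trivial, hle⟩⟩
        · rintro ⟨_, _, _, h⟩
          rcases h with ⟨heq, _⟩ | ⟨_, _, hle⟩
          · exact absurd heq (by decide)
          · exact hle
      · rw [mget_H0]
        simp only [Bool.false_eq_true, false_iff]
        rintro ⟨hi, hj, hne, _⟩
        exact hc ⟨List.mem_range.mpr hi, hj, hne⟩
    · simp only [if_neg h1, if_neg h2, ite_self, msiFoldlConst]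
      rw [mget_H0]
      simp [h1, h2]

theorem msiE_irrefl (PrefMat : List (List Int)) (Type_ : String) (i : Nat) :
    ¬ msiE PrefMat Type_ i i := by
  rw [msiE_iff]
  rintro ⟨_, _, hne, _⟩
  exact hne rfl

theorem msiE_bounds (PrefMat : List (List Int)) (Type_ : String) (i j : Nat)
    (h : msiE PrefMat Type_ i j) : i < PrefMat.length ∧ j < PrefMat.length := by
  rw [msiE_iff] at h
  exact ⟨h.1, h.2.1⟩

-- ---- phase 2: Floyd–Warshall computes msiIter, which is TransGen ----
theorem msiFW_inner (n k k1 : Nat) (hk1 : k1 < n) (hk1k : k1 ≠ k) :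
    ∀ (l : List Nat) (H : List (List Bool)), (∀ x ∈ l, x < n) → msiWF H n →
      msiWF (l.foldl (fun H k2 => if k2 ≠ k ∧ k2 ≠ k1 then
          (if mget H k1 k && mget H k k2 then mset H k1 k2 true else H) else H) H) n ∧
      ∀ i j, (mget (l.foldl (fun H k2 => if k2 ≠ k ∧ k2 ≠ k1 then
          (if mget H k1 k && mget H k k2 then mset H k1 k2 true else H) else H) H) i j = true ↔
        (mget H i j = true ∨ (i = k1 ∧ j ∈ l ∧ j ≠ k ∧ j ≠ k1 ∧ mget H k1 k = true ∧ mget H k j = true))) := by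
  intro l
  induction l with
  | nil =>
    intro H _ hWF
    exact ⟨hWF, fun i j => by simp⟩
  | cons k2 l ih =>
    intro H hl hWF
    rw [List.foldl_cons]
    have hk2n : k2 < n := hl k2 (by simp)
    by_cases hg : k2 ≠ k ∧ k2 ≠ k1
    · rw [if_pos hg]
      have hWF1 : msiWF (if mget H k1 k && mget H k k2 then mset H k1 k2 true else H) n := by
        split_ifs
        · exact msiWF_mset H n k1 k2 true hWF
        · exact hWF
      have f1 : mget (if mget H k1 k && mget H k k2 then mset H k1 k2 true else H) k1 k
          = mget H k1 k := by
        split_ifs with hc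
        · exact mget_mset_ne H k1 k2 true k1 k (Or.inr (Ne.symm hg.1))
        · rfl
      have f2 : ∀ j, mget (if mget H k1 k && mget H k k2 then mset H k1 k2 true else H) k j
          = mget H k j := by
        intro j
        split_ifs with hc
        · exact mget_mset_ne H k1 k2 true k j (Or.inl (Ne.symm hk1k))
        · rfl
      have f3 : ∀ i j, (mget (if mget H k1 k && mget H k k2 then mset H k1 k2 true else H) i j = true ↔
          (mget H i j = true ∨ (i = k1 ∧ j = k2 ∧ mget H k1 k = true ∧ mget H k k2 = true))) := by
        intro i j
        split_ifs with hc
        · rw [Bool.and_eq_true] at hc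
          by_cases hij : i = k1 ∧ j = k2
          · rw [hij.1, hij.2, mget_mset_self H n k1 k2 true hWF hk1 hk2n]
            simp [hc.1, hc.2]
          · rw [mget_mset_ne H k1 k2 true i j (by tauto)]
            simp only [iff_self_or]
            rintro ⟨hi, hj, _⟩
            exact absurd ⟨hi, hj⟩ hij
        · constructor
          · exact Or.inl
          · rintro (h | ⟨_, _, h1, h2⟩)
            · exact h
            · exact absurd (show (mget H k1 k && mget H k k2) = true by rw [h1, h2]; rfl) hc
      obtain ⟨hWF', hchar⟩ := ih _ (fun x hx => hl x (by simp [hx])) hWF1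
      refine ⟨hWF', fun i j => ?_⟩
      rw [hchar i j, f3 i j, f1, f2 j]
      rw [List.mem_cons]
      by_cases hj : j = k2
      · subst hj
        have h1 := hg.1
        have h2 := hg.2
        tauto
      · tauto
    · rw [if_neg hg]
      obtain ⟨hWF', hchar⟩ := ih H (fun x hx => hl x (by simp [hx])) hWF
      refine ⟨hWF', fun i j => ?_⟩
      rw [hchar i j, List.mem_cons]
      rcases not_and_or.mp hg with h | h
      · rw [not_not] at h; subst h; tauto
      · rw [not_not] at h; subst h; tauto

theorem msiFW_outer (n k : Nat) :
    ∀ (l : List Nat) (H : List (List Bool)), (∀ x ∈ l, x < n) → msiWF H n →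
      msiWF (l.foldl (fun H k1 => if k1 ≠ k then (List.range n).foldl (fun H k2 => if k2 ≠ k ∧ k2 ≠ k1 then
          (if mget H k1 k && mget H k k2 then mset H k1 k2 true else H) else H) H else H) H) n ∧
      ∀ i j, (mget (l.foldl (fun H k1 => if k1 ≠ k then (List.range n).foldl (fun H k2 => if k2 ≠ k ∧ k2 ≠ k1 then
          (if mget H k1 k && mget H k k2 then mset H k1 k2 true else H) else H) H else H) H) i j = true ↔
        (mget H i j = true ∨ (i ∈ l ∧ i ≠ k ∧ j < n ∧ j ≠ k ∧ j ≠ i ∧ mget H i k = true ∧ mget H k j = true))) := by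
  intro l
  induction l with
  | nil =>
    intro H _ hWF
    exact ⟨hWF, fun i j => by simp⟩
  | cons k1 l ih =>
    intro H hl hWF
    rw [List.foldl_cons]
    have hk1n : k1 < n := hl k1 (by simp)
    by_cases hk : k1 ≠ k
    · rw [if_pos hk]
      obtain ⟨hWF1, hchar1⟩ := msiFW_inner n k k1 hk1n hk (List.range n) H
        (fun x hx => List.mem_range.mp hx) hWF
      obtain ⟨hWF', hchar⟩ := ih _ (fun x hx => hl x (by simp [hx])) hWF1
      refine ⟨hWF', fun i j => ?_⟩
      rw [hchar i j]
      have e1 : ∀ i', mget (List.foldl (fun H k2 => if k2 ≠ k ∧ k2 ≠ k1 then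
          (if mget H k1 k && mget H k k2 then mset H k1 k2 true else H) else H) H (List.range n)) i' k
          = mget H i' k := by
        intro i'
        rw [Bool.eq_iff_iff, hchar1 i' k]
        constructor
        · rintro (h | ⟨_, _, hkk, _⟩)
          · exact h
          · exact absurd rfl hkk
        · exact Or.inl
      have e2 : ∀ j', mget (List.foldl (fun H k2 => if k2 ≠ k ∧ k2 ≠ k1 then
          (if mget H k1 k && mget H k k2 then mset H k1 k2 true else H) else H) H (List.range n)) k j'
          = mget H k j' := by
        intro j'
        rw [Bool.eq_iff_iff, hchar1 k j']
        constructor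
        · rintro (h | ⟨hkk1, _⟩)
          · exact h
          · exact absurd hkk1.symm hk
        · exact Or.inl
      rw [e1 i, e2 j, hchar1 i j, List.mem_cons]
      simp only [List.mem_range]
      by_cases hik1 : i = k1
      · subst hik1
        tauto
      · tauto
    · rw [if_neg hk, not_not] at *
      obtain ⟨hWF', hchar⟩ := ih H (fun x hx => hl x (by simp [hx])) hWF
      refine ⟨hWF', fun i j => ?_⟩
      rw [hchar i j, List.mem_cons]
      subst hk
      constructor
      · rintro (h | ⟨him, hik, rest⟩)
        · exact Or.inl h
        · exact Or.inr ⟨Or.inr him, hik, rest⟩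
      · rintro (h | ⟨him | him, hik, rest⟩)
        · exact Or.inl h
        · exact absurd him hik
        · exact Or.inr ⟨him, hik, rest⟩

theorem msiFW_levels (n : Nat) :
    ∀ (l : List Nat) (H : List (List Bool)) (P : Nat → Nat → Prop), (∀ x ∈ l, x < n) → msiWF H n →
      (∀ i j, mget H i j = true ↔ P i j) → (∀ i, ¬ P i i) →
      msiWF (l.foldl (fun H k => (List.range n).foldl (fun H k1 => if k1 ≠ k then (List.range n).foldl (fun H k2 => if k2 ≠ k ∧ k2 ≠ k1 then
          (if mget H k1 k && mget H k k2 then mset H k1 k2 true else H) else H) H else H) H) H) n ∧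
      ∀ i j, (mget (l.foldl (fun H k => (List.range n).foldl (fun H k1 => if k1 ≠ k then (List.range n).foldl (fun H k2 => if k2 ≠ k ∧ k2 ≠ k1 then
          (if mget H k1 k && mget H k k2 then mset H k1 k2 true else H) else H) H else H) H) H) i j = true ↔ msiIter l P i j) := by
  intro l
  induction l with
  | nil =>
    intro H P _ hWF hP _
    exact ⟨hWF, hP⟩
  | cons k t ih =>
    intro H P hl hWF hP hIrr
    rw [List.foldl_cons]
    have hkn : k < n := hl k (by simp)
    obtain ⟨hWF1, hchar1⟩ := msiFW_outer n k (List.range n) H (fun x hx => List.mem_range.mp hx) hWF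
    have hP' : ∀ i j, mget (List.foldl (fun H k1 => if k1 ≠ k then (List.range n).foldl (fun H k2 => if k2 ≠ k ∧ k2 ≠ k1 then
        (if mget H k1 k && mget H k k2 then mset H k1 k2 true else H) else H) H else H) H (List.range n)) i j = true ↔
        (P i j ∨ (i ≠ j ∧ P i k ∧ P k j)) := by
      intro i j
      rw [hchar1 i j]
      constructor
      · rintro (h | ⟨_, _, _, _, hji, h1, h2⟩)
        · exact Or.inl ((hP i j).mp h)
        · exact Or.inr ⟨Ne.symm hji, (hP i k).mp h1, (hP k j).mp h2⟩
      · rintro (h | ⟨hij, h1, h2⟩)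
        · exact Or.inl ((hP i j).mpr h)
        · have hb1 := mget_true_bounds H n i k hWF ((hP i k).mpr h1)
          have hb2 := mget_true_bounds H n k j hWF ((hP k j).mpr h2)
          have hik : i ≠ k := fun he => hIrr k (he ▸ h1)
          have hjk : j ≠ k := fun he => hIrr k (he ▸ h2)
          exact Or.inr ⟨List.mem_range.mpr hb1.1, hik, hb2.2, hjk, Ne.symm hij,
            (hP i k).mpr h1, (hP k j).mpr h2⟩
    have hIrr' : ∀ i, ¬ (P i i ∨ (i ≠ i ∧ P i k ∧ P k i)) := by
      rintro i (h | ⟨hii, _⟩)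
      · exact hIrr i h
      · exact hii rfl
    exact ih _ (fun i j => P i j ∨ (i ≠ j ∧ P i k ∧ P k j))
      (fun x hx => hl x (by simp [hx])) hWF1 hP' hIrr' 

-- msiIter toolbox
theorem msiIter_base (P : Nat → Nat → Prop) (l : List Nat) (i j : Nat) (h : P i j) :
    msiIter l P i j := by
  induction l generalizing P with
  | nil => exact h
  | cons k t ih => exact ih _ (Or.inl h)

theorem msiIter_append_singleton (l : List Nat) (k : Nat) (P : Nat → Nat → Prop) (i j : Nat) :
    msiIter (l ++ [k]) P i j ↔ (msiIter l P i j ∨ (i ≠ j ∧ msiIter l P i k ∧ msiIter l P k j)) := by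
  induction l generalizing P with
  | nil => exact Iff.rfl
  | cons a t ih => exact ih _

theorem msiIter_sound' (E : Nat → Nat → Prop) :
    ∀ (l : List Nat) (P : Nat → Nat → Prop),
      (∀ i j, P i j → i ≠ j ∧ Relation.TransGen E i j) →
      ∀ i j, msiIter l P i j → i ≠ j ∧ Relation.TransGen E i j := by
  intro l
  induction l with
  | nil => exact fun P hP => hP
  | cons k t ih =>
    intro P hP i j h
    refine ih _ ?_ i j h
    rintro i j (h | ⟨hij, h1, h2⟩)
    · exact hP i j h
    · exact ⟨hij, Relation.TransGen.trans (hP i k h1).2 (hP k j h2).2⟩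

theorem msiIter_sound (E : Nat → Nat → Prop) (hIrr : ∀ i, ¬ E i i) :
    ∀ (l : List Nat) (i j : Nat), msiIter l E i j → i ≠ j ∧ Relation.TransGen E i j := by
  intro l i j
  exact msiIter_sound' E l E
    (fun i j h => ⟨fun he => hIrr j (he ▸ h), Relation.TransGen.single h⟩) i j

-- chain toolbox
theorem msiChain_append_edge (E : Nat → Nat → Prop) (i b j : Nat) (l : List Nat)
    (hc : msiChain E i l b) (he : E b j) : msiChain E i (l ++ [b]) j := by
  induction hc with
  | nil h => exact msiChain.cons h (msiChain.nil he)
  | cons h _ ih => exact msiChain.cons h (ih he)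

theorem msiChain_of_tg (E : Nat → Nat → Prop) (i j : Nat)
    (h : Relation.TransGen E i j) : ∃ l, msiChain E i l j := by
  induction h with
  | single h => exact ⟨[], msiChain.nil h⟩
  | tail _ he ih =>
    obtain ⟨l, hc⟩ := ih
    exact ⟨l ++ [_], msiChain_append_edge E _ _ _ l hc he⟩

theorem msiChain_bounds (E : Nat → Nat → Prop) (n : Nat)
    (hE : ∀ i j, E i j → i < n ∧ j < n) (i j : Nat) (l : List Nat)
    (h : msiChain E i l j) : ∀ x ∈ l, x < n := by
  induction h with
  | nil => simp
  | cons he _ ih =>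
    intro x hx
    rcases List.mem_cons.mp hx with rfl | hx
    · exact (hE _ _ he).2
    · exact ih x hx

theorem msiChain_split (E : Nat → Nat → Prop) :
    ∀ (l1 : List Nat) (i u j : Nat) (l2 : List Nat),
      msiChain E i (l1 ++ u :: l2) j → msiChain E i l1 u ∧ msiChain E u l2 j := by
  intro l1
  induction l1 with
  | nil =>
    intro i u j l2 h
    cases h with
    | cons he hc => exact ⟨msiChain.nil he, hc⟩
  | cons a t ih =>
    intro i u j l2 h
    cases h with
    | cons he hc =>
      obtain ⟨h1, h2⟩ := ih a u j l2 hc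
      exact ⟨msiChain.cons he h1, h2⟩

theorem msiSplitFirst (m : Nat) : ∀ (l : List Nat), m ∈ l →
    ∃ l1 l2, l = l1 ++ m :: l2 ∧ m ∉ l1 := by
  intro l
  induction l with
  | nil => simp
  | cons a t ih =>
    intro hm
    by_cases ha : m = a
    · exact ⟨[], t, by simp [ha], by simp⟩
    · have hmt : m ∈ t := by
        rcases List.mem_cons.mp hm with h | h
        · exact absurd h ha
        · exact h
      obtain ⟨l1, l2, heq, hnm⟩ := ih hmt
      exact ⟨a :: l1, l2, by rw [heq]; rfl, by simp [Ne.symm, ha, hnm]⟩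

theorem msiSplitLast (m : Nat) : ∀ (l : List Nat), m ∈ l →
    ∃ l1 l2, l = l1 ++ m :: l2 ∧ m ∉ l2 := by
  intro l
  induction l with
  | nil => simp
  | cons a t ih =>
    intro hm
    by_cases hmt : m ∈ t
    · obtain ⟨l1, l2, heq, hnm⟩ := ih hmt
      exact ⟨a :: l1, l2, by rw [heq]; rfl, hnm⟩
    · have ha : m = a := by
        rcases List.mem_cons.mp hm with h | h
        · exact h
        · exact absurd h hmt
      exact ⟨[], t, by simp [ha], hmt⟩

-- path surgery: a chain with intermediates < m is accepted at Floyd–Warshall level m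
theorem msiSurgery (E : Nat → Nat → Prop) :
    ∀ (m : Nat) (l : List Nat) (i j : Nat), i ≠ j → (∀ x ∈ l, x < m) →
      msiChain E i l j → msiIter (List.range m) E i j := by
  intro m
  induction m with
  | zero =>
    intro l i j hij hb hc
    cases l with
    | nil => cases hc with | nil h => exact h
    | cons a t => exact absurd (hb a (by simp)) (Nat.not_lt_zero a)
  | succ m ihm =>
    suffices hfuel : ∀ (fuel : Nat) (l : List Nat) (i j : Nat), l.length ≤ fuel → i ≠ j →
        (∀ x ∈ l, x < m + 1) → msiChain E i l j → msiIter (List.range (m + 1)) E i j by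
      intro l i j hij hb hc
      exact hfuel l.length l i j le_rfl hij hb hc
    intro fuel
    induction fuel with
    | zero =>
      intro l i j hlen hij hb hc
      cases l with
      | nil => cases hc with | nil h => exact msiIter_base E _ i j h
      | cons a t => simp at hlen
    | succ fuel ihf =>
      intro l i j hlen hij hb hc
      by_cases hm : m ∈ l
      · by_cases him : i = m
        · obtain ⟨l1, l2, heq, _⟩ := msiSplitFirst m l hm
          have hc1 : msiChain E i (l1 ++ m :: l2) j := heq ▸ hc
          obtain ⟨_, hsuf⟩ := msiChain_split E l1 i m j l2 hc1
          refine ihf l2 i j ?_ hij (fun x hx => hb x (by rw [heq]; simp [hx])) (him ▸ hsuf)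
          have : l.length = l1.length + 1 + l2.length := by rw [heq]; simp; omega
          omega
        · by_cases hjm : j = m
          · obtain ⟨l1, l2, heq, hnm⟩ := msiSplitFirst m l hm
            have hc1 : msiChain E i (l1 ++ m :: l2) j := heq ▸ hc
            obtain ⟨hpre, _⟩ := msiChain_split E l1 i m j l2 hc1
            have hb1 : ∀ x ∈ l1, x < m := by
              intro x hx
              have hxm : x ≠ m := fun he => hnm (he ▸ hx)
              have := hb x (by rw [heq]; simp [hx])
              omega
            have hiter := ihm l1 i m him hb1 hpre
            rw [List.range_succ, msiIter_append_singleton]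
            exact Or.inl (hjm ▸ hiter)
          · obtain ⟨l1, _, heq1, hnm1⟩ := msiSplitFirst m l hm
            obtain ⟨_, lb, heq2, hnm2⟩ := msiSplitLast m l hm
            have hc1 : msiChain E i (l1 ++ m :: _) j := heq1 ▸ hc
            obtain ⟨hpre, _⟩ := msiChain_split E l1 i m j _ hc1
            have hc2 : msiChain E i (_ ++ m :: lb) j := heq2 ▸ hc
            obtain ⟨_, hsuf⟩ := msiChain_split E _ i m j lb hc2
            have hb1 : ∀ x ∈ l1, x < m := by
              intro x hx
              have hxm : x ≠ m := fun he => hnm1 (he ▸ hx)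
              have := hb x (by rw [heq1]; simp [hx])
              omega
            have hb2 : ∀ x ∈ lb, x < m := by
              intro x hx
              have hxm : x ≠ m := fun he => hnm2 (he ▸ hx)
              have := hb x (by rw [heq2]; simp [hx])
              omega
            have h1 := ihm l1 i m him hb1 hpre
            have h2 := ihm lb m j (fun he => hjm he.symm) hb2 hsuf
            rw [List.range_succ, msiIter_append_singleton]
            exact Or.inr ⟨hij, h1, h2⟩
      · have hb' : ∀ x ∈ l, x < m := by
          intro x hx
          have hxm : x ≠ m := fun he => hm (he ▸ hx)
          have := hb x hx
          omega
        rw [List.range_succ, msiIter_append_singleton]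
        exact Or.inl (ihm l i j hij hb' hc)

-- the two directions combined: the FW matrix is exactly (≠ ∧ TransGen) of the edge indicator
theorem msiFW_char (n : Nat) (H1 : List (List Bool)) (E : Nat → Nat → Prop)
    (hWF : msiWF H1 n) (hE : ∀ i j, mget H1 i j = true ↔ E i j)
    (hIrr : ∀ i, ¬ E i i) (hB : ∀ i j, E i j → i < n ∧ j < n) :
    ∀ i j, (mget (msiFW n H1) i j = true ↔ (i ≠ j ∧ Relation.TransGen E i j)) := by
  intro i j
  have hlev := msiFW_levels n (List.range n) H1 E (fun x hx => List.mem_range.mp hx) hWF hE hIrr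
  unfold msiFW
  rw [hlev.2 i j]
  constructor
  · exact msiIter_sound E hIrr (List.range n) i j
  · rintro ⟨hij, htg⟩
    obtain ⟨l, hc⟩ := msiChain_of_tg E i j htg
    exact msiSurgery E n l i j hij (msiChain_bounds E n hB i j l hc) hc

-- ---- phase 2': the DFS visited set is exactly TransGen of the adjacency relation ----
theorem msiEscape (adj : List (List Nat)) (v : Nat) (stack : List Nat) (seen : List Bool)
    (hseenv : seen.getD v false = true)
    (hInv : ∀ u j, seen.getD u false = true → j ∈ adj.getD u [] → seen.getD j false = true ∨ j ∈ v :: stack) :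
    ∀ a t, seen.getD a false = true → Relation.ReflTransGen (fun a b => b ∈ adj.getD a []) a t →
      seen.getD t false = true ∨ ∃ w ∈ stack, Relation.ReflTransGen (fun a b => b ∈ adj.getD a []) w t := by
  intro a t ha hrtg
  revert ha
  induction hrtg using Relation.ReflTransGen.head_induction_on with
  | refl => intro ha; exact Or.inl ha
  | @head x u h' hrtg' ih =>
    intro ha
    rcases hInv x u ha h' with hu | hu
    · exact ih hu
    · rcases List.mem_cons.mp hu with rfl | hu
      · exact ih hseenv
      · exact Or.inr ⟨u, hu, hrtg'⟩

theorem msiDfs_char (adj : List (List Nat)) (n : Nat)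
    (hadj : ∀ v j, j ∈ adj.getD v [] → j < n) :
    ∀ (stack : List Nat) (seen : List Bool), seen.length = n → (∀ v ∈ stack, v < n) →
      (∀ u j, seen.getD u false = true → j ∈ adj.getD u [] → seen.getD j false = true ∨ j ∈ stack) →
      ∀ t, ((msiDfs adj stack seen).getD t false = true ↔
        (seen.getD t false = true ∨ ∃ v ∈ stack, Relation.ReflTransGen (fun a b => b ∈ adj.getD a []) v t)) := by
  intro stack seen
  induction stack, seen using msiDfs.induct adj with
  | case1 seen =>
    intro _ _ _ t
    simp only [msiDfs]
    simp
  | case2 v stack seen hseen ih =>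
    intro hlen hstk hInv t
    simp only [msiDfs]
    rw [if_pos hseen]
    have hInv' : ∀ u j, seen.getD u false = true → j ∈ adj.getD u [] →
        seen.getD j false = true ∨ j ∈ stack := by
      intro u j hu hj
      rcases hInv u j hu hj with h | h
      · exact Or.inl h
      · rcases List.mem_cons.mp h with rfl | h
        · exact Or.inl hseen
        · exact Or.inr h
    rw [ih hlen (fun x hx => hstk x (by simp [hx])) hInv' t]
    constructor
    · rintro (h | ⟨w, hw, hrtg⟩)
      · exact Or.inl h
      · exact Or.inr ⟨w, by simp [hw], hrtg⟩
    · rintro (h | ⟨w, hw, hrtg⟩)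
      · exact Or.inl h
      · rcases List.mem_cons.mp hw with rfl | hw
        · exact msiEscape adj w stack seen hseen hInv w t hseen hrtg
        · exact Or.inr ⟨w, hw, hrtg⟩
  | case3 v stack seen hseen hv ih =>
    intro hlen hstk hInv t
    simp only [msiDfs]
    rw [if_neg hseen, dif_pos hv]
    have hlen' : (seen.set v true).length = n := by rw [List.length_set]; exact hlen
    have hstk' : ∀ x ∈ (adj.getD v []).reverse ++ stack, x < n := by
      intro x hx
      rcases List.mem_append.mp hx with hx | hx
      · exact hadj v x (List.mem_reverse.mp hx)
      · exact hstk x (by simp [hx])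
    have hInv' : ∀ u j, (seen.set v true).getD u false = true → j ∈ adj.getD u [] →
        (seen.set v true).getD j false = true ∨ j ∈ (adj.getD v []).reverse ++ stack := by
      intro u j hu hj
      by_cases hjv : j = v
      · exact Or.inl (by rw [hjv, msiGetDset_self _ _ _ _ hv])
      · by_cases huv : u = v
        · exact Or.inr (List.mem_append.mpr (Or.inl (List.mem_reverse.mpr (huv ▸ hj))))
        · rw [msiGetDset_ne _ _ _ _ _ huv] at hu
          rcases hInv u j hu hj with h | h
          · exact Or.inl (by rw [msiGetDset_ne _ _ _ _ _ hjv]; exact h)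
          · rcases List.mem_cons.mp h with rfl | h
            · exact absurd rfl hjv
            · exact Or.inr (List.mem_append.mpr (Or.inr h))
    rw [ih hlen' hstk' hInv' t]
    constructor
    · rintro (h | ⟨w, hw, hrtg⟩)
      · by_cases htv : t = v
        · exact Or.inr ⟨v, by simp, htv ▸ Relation.ReflTransGen.refl⟩
        · rw [msiGetDset_ne _ _ _ _ _ htv] at h
          exact Or.inl h
      · rcases List.mem_append.mp hw with hw | hw
        · exact Or.inr ⟨v, by simp, Relation.ReflTransGen.head (List.mem_reverse.mp hw) hrtg⟩
        · exact Or.inr ⟨w, by simp [hw], hrtg⟩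
    · rintro (h | ⟨w, hw, hrtg⟩)
      · left
        by_cases htv : t = v
        · rw [htv, msiGetDset_self _ _ _ _ hv]
        · rw [msiGetDset_ne _ _ _ _ _ htv]; exact h
      · rcases List.mem_cons.mp hw with rfl | hw
        · rcases Relation.ReflTransGen.cases_head hrtg with rfl | ⟨u, hu, hrtg'⟩
          · exact Or.inl (by rw [msiGetDset_self _ _ _ _ hv])
          · exact Or.inr ⟨u, List.mem_append.mpr (Or.inl (List.mem_reverse.mpr hu)), hrtg'⟩
        · exact Or.inr ⟨w, List.mem_append.mpr (Or.inr hw), hrtg⟩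
  | case4 v stack seen hseen hv ih =>
    intro hlen hstk hInv t
    exact absurd (hlen ▸ hstk v (by simp)) hv

theorem msiReach_char (adj : List (List Nat)) (n : Nat)
    (hadj : ∀ v j, j ∈ adj.getD v [] → j < n) (s t : Nat) (hs : s < n) :
    (mget (msiReach adj n) s t = true ↔ Relation.TransGen (fun a b => b ∈ adj.getD a []) s t) := by
  have hrep : ∀ u, (List.replicate n false).getD u false = false := by
    intro u
    rcases Nat.lt_or_ge u n with hu | hu
    · simp [List.getD, hu]
    · rw [msiGetD_out _ _ _ (by simpa using hu)]
  rw [mget, msiReach, getD_map_range', if_pos hs]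
  rw [msiDfs_char adj n hadj ((adj.getD s []).reverse) (List.replicate n false)
    (by simp) (fun x hx => hadj s x (List.mem_reverse.mp hx))
    (fun u j hu _ => absurd hu (by rw [hrep u]; simp)) t]
  rw [hrep t]
  simp only [Bool.false_eq_true, false_or]
  rw [Relation.TransGen.head'_iff]
  constructor
  · rintro ⟨v, hv, hrtg⟩
    exact ⟨v, List.mem_reverse.mp hv, hrtg⟩
  · rintro ⟨v, hv, hrtg⟩
    exact ⟨v, List.mem_reverse.mpr hv, hrtg⟩

-- ---- phase 3: the InMaximal loops ----
theorem msiIM_inner (k1 : Nat) (c : Nat → Bool) :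
    ∀ (l : List Nat) (IM : List Bool),
      l.foldl (fun IM k2 => if k2 ≠ k1 then (if c k2 then IM.set k1 false else IM) else IM) IM =
      if ∃ k2 ∈ l, k2 ≠ k1 ∧ c k2 = true then IM.set k1 false else IM := by
  intro l
  induction l with
  | nil =>
    intro IM
    simp
  | cons a l ih =>
    intro IM
    rw [List.foldl_cons]
    by_cases hga : a ≠ k1 ∧ c a = true
    · rw [if_pos hga.1, if_pos hga.2, ih]
      have hset : (if ∃ k2 ∈ l, k2 ≠ k1 ∧ c k2 = true then (IM.set k1 false).set k1 false
          else IM.set k1 false) = IM.set k1 false := by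
        split_ifs <;> simp [List.set_set]
      rw [hset, if_pos ⟨a, by simp, hga⟩]
    · have hstep : (if a ≠ k1 then (if c a then IM.set k1 false else IM) else IM) = IM := by
        by_cases h1 : a ≠ k1
        · rw [if_pos h1, if_neg (fun hc => hga ⟨h1, hc⟩)]
        · rw [if_neg h1]
      rw [hstep, ih]
      have hcond : (∃ k2 ∈ a :: l, k2 ≠ k1 ∧ c k2 = true) ↔ (∃ k2 ∈ l, k2 ≠ k1 ∧ c k2 = true) := by
        simp only [List.mem_cons]
        constructor
        · rintro ⟨k2, hk2 | hk2, hp⟩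
          · exact absurd (hk2 ▸ hp) hga
          · exact ⟨k2, hk2, hp⟩
        · rintro ⟨k2, hk2, hp⟩
          exact ⟨k2, Or.inr hk2, hp⟩
      rw [if_congr hcond rfl rfl]

theorem msiIM_outer (trig : Nat → Bool) :
    ∀ (l : List Nat) (IM : List Bool) (i : Nat), i < IM.length →
      (l.foldl (fun IM k1 => if trig k1 then IM.set k1 false else IM) IM).getD i true =
      if i ∈ l ∧ trig i = true then false else IM.getD i true := by
  intro l
  induction l with
  | nil =>
    intro IM i _
    simp
  | cons k1 l ih =>
    intro IM i hi
    rw [List.foldl_cons]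
    have hlen1 : (if trig k1 = true then IM.set k1 false else IM).length = IM.length := by
      split_ifs <;> simp
    rw [ih _ i (by omega)]
    by_cases h1 : i ∈ l ∧ trig i = true
    · rw [if_pos h1, if_pos ⟨by simp [h1.1], h1.2⟩]
    · rw [if_neg h1]
      by_cases ht : trig k1 = true
      · rw [if_pos ht]
        by_cases hik1 : i = k1
        · rw [if_pos (show i ∈ k1 :: l ∧ trig i = true from
            ⟨by simp [hik1], by rw [hik1]; exact ht⟩)]
          rw [hik1, msiGetDset_self _ _ _ _ (by omega)]
        · rw [msiGetDset_ne _ _ _ _ _ hik1, if_neg (by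
            rintro ⟨him, hti⟩
            rcases List.mem_cons.mp him with h' | h'
            · exact hik1 h'
            · exact h1 ⟨h', hti⟩)]
      · rw [if_neg ht]
        rw [if_neg (by
          rintro ⟨him, hti⟩
          rcases List.mem_cons.mp him with h' | h'
          · exact ht (h' ▸ hti)
          · exact h1 ⟨h', hti⟩)]

theorem msiZipFilterMap :
    ∀ (l : List Nat) (IM : List Bool) (φ : Nat → Bool) (hlen : l.length = IM.length),
      (∀ k (hk : k < l.length), IM[k]'(hlen ▸ hk) = φ (l[k]'hk)) →
      (((l.zip IM).filter (fun p => p.2)).map (fun p => ((p.1 : Nat) : Int))) =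
      (l.filter φ).map (fun i => ((i : Nat) : Int)) := by
  intro l
  induction l with
  | nil =>
    intro IM φ _ _
    simp
  | cons x l ih =>
    intro IM φ hlen hk
    cases IM with
    | nil => simp at hlen
    | cons b IM =>
      have h0 : b = φ x := hk 0 (by simp)
      have hlen' : l.length = IM.length := by simpa using hlen
      rw [List.zip_cons_cons, List.filter_cons, List.filter_cons]
      have hrec := ih IM φ hlen' (fun k hkl => by
        have := hk (k + 1) (by simpa using Nat.succ_lt_succ hkl)
        simpa using this)
      by_cases hb : b = true
      · rw [if_pos (by simpa using hb), if_pos (by rw [← h0]; exact hb)]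
        rw [List.map_cons, List.map_cons, hrec]
      · rw [if_neg (by simpa using hb), if_neg (by rw [← h0]; exact hb)]
        exact hrec

theorem msiIMFoldLen (trig : Nat → Bool) : ∀ (l : List Nat) (IM : List Bool),
    (l.foldl (fun IM k1 => if trig k1 then IM.set k1 false else IM) IM).length = IM.length := by
  intro l
  induction l with
  | nil => intro IM; rfl
  | cons k1 l ih =>
    intro IM
    rw [List.foldl_cons, ih]
    split_ifs <;> simp

theorem msiCell (n k : Nat) (TG : Nat → Nat → Prop) (mA mR : Nat → Nat → Bool)
    (hA : ∀ i j, mA i j = true ↔ (i ≠ j ∧ TG i j))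
    (hB : ∀ i j, i < n → (mR i j = true ↔ TG i j))
    (hk : k < n) :
    (if k ∈ List.range n ∧ decide (∃ k2 ∈ List.range n, k2 ≠ k ∧ (mA k2 k && !(mA k k2)) = true) = true
      then false else true)
      = (List.range n).all (fun j => mR k j || !(mR j k)) := by
  by_cases htr : ∃ j ∈ List.range n, j ≠ k ∧ (mA j k && !(mA k j)) = true
  · rw [if_pos ⟨List.mem_range.mpr hk, decide_eq_true htr⟩]
    obtain ⟨j, hjm, hjk, hcond⟩ := htr
    rw [Bool.and_eq_true] at hcond
    have hTGjk : TG j k := ((hA j k).mp hcond.1).2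
    have hnTGkj : ¬ TG k j := by
      intro hc
      have : mA k j = true := (hA k j).mpr ⟨Ne.symm hjk, hc⟩
      rw [this] at hcond
      simp at hcond
    have hall : (List.range n).all (fun j => mR k j || !(mR j k)) ≠ true := by
      intro hc
      rw [List.all_eq_true] at hc
      have := hc j hjm
      rw [Bool.or_eq_true] at this
      rcases this with h | h
      · exact hnTGkj ((hB k j hk).mp h)
      · have hm : mR j k = true := (hB j k (List.mem_range.mp hjm)).mpr hTGjk
        rw [hm] at h
        simp at h
    exact (Bool.eq_false_iff.mpr hall).symm
  · rw [if_neg (by rintro ⟨_, hdec⟩; exact htr (of_decide_eq_true hdec))]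
    symm
    rw [List.all_eq_true]
    intro j hjm
    by_cases hjk : j = k
    · rw [hjk]
      exact Bool.or_not_self _
    · have hno : ¬ (j ≠ k ∧ (mA j k && !(mA k j)) = true) := fun hc => htr ⟨j, hjm, hc⟩
      by_cases hTG : TG k j
      · rw [Bool.or_eq_true]
        exact Or.inl ((hB k j hk).mpr hTG)
      · have hnjk : ¬ TG j k := by
          intro hc
          apply hno
          refine ⟨hjk, ?_⟩
          rw [Bool.and_eq_true]
          refine ⟨(hA j k).mpr ⟨hjk, hc⟩, ?_⟩
          have : mA k j = false := by
            rw [Bool.eq_false_iff]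
            intro hmc
            exact hTG ((hA k j).mp hmc).2
          rw [this]
          rfl
        have : mR j k = false := by
          rw [Bool.eq_false_iff]
          intro hmc
          exact hnjk ((hB j k (List.mem_range.mp hjm)).mp hmc)
        rw [Bool.or_eq_true]
        right
        rw [this]
        rfl

-- ===== VERDICT (by name: the statement is the Claim_ definition above) =====
theorem MaximalSetIndices_spec : Claim_equal_MaximalSetIndices := by
  intro PrefMat Type_ _hDom _hPre
  unfold Spec_MaximalSetIndices
  simp only [MaximalSetIndices, MaximalSetIndices_alt]
  have hH2 : ∀ i j, mget (msiFW PrefMat.length (msiInit PrefMat Type_)) i j = true ↔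
      (i ≠ j ∧ Relation.TransGen (msiE PrefMat Type_) i j) :=
    msiFW_char PrefMat.length (msiInit PrefMat Type_) (msiE PrefMat Type_)
      (msiInit_WF PrefMat Type_) (msiInit_char PrefMat Type_) (msiE_irrefl PrefMat Type_)
      (fun i j h => msiE_bounds PrefMat Type_ i j h)
  have hRc : ∀ s t, s < PrefMat.length →
      (mget (msiReach (msiAdj PrefMat Type_) PrefMat.length) s t = true ↔
        Relation.TransGen (msiE PrefMat Type_) s t) :=
    fun s t hs => msiReach_char (msiAdj PrefMat Type_) PrefMat.length
      (fun v j h => (msiE_bounds PrefMat Type_ v j h).2) s t hs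
  have hIMeq : msiIM PrefMat.length (msiFW PrefMat.length (msiInit PrefMat Type_)) =
      (List.range PrefMat.length).foldl (fun IM k1 =>
        if decide (∃ k2 ∈ List.range PrefMat.length, k2 ≠ k1 ∧
          (mget (msiFW PrefMat.length (msiInit PrefMat Type_)) k2 k1 &&
           !(mget (msiFW PrefMat.length (msiInit PrefMat Type_)) k1 k2)) = true)
        then IM.set k1 false else IM) (List.replicate PrefMat.length true) := by
    unfold msiIM
    congr 1
    funext IM k1
    rw [msiIM_inner k1 (fun k2 => mget (msiFW PrefMat.length (msiInit PrefMat Type_)) k2 k1 &&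
      !(mget (msiFW PrefMat.length (msiInit PrefMat Type_)) k1 k2)) (List.range PrefMat.length) IM]
    simp only [decide_eq_true_eq]
  have hIMlen : (msiIM PrefMat.length (msiFW PrefMat.length (msiInit PrefMat Type_))).length
      = PrefMat.length := by
    rw [hIMeq, msiIMFoldLen]
    simp
  have hlen2 : (List.range PrefMat.length).length =
      (msiIM PrefMat.length (msiFW PrefMat.length (msiInit PrefMat Type_))).length := by
    simp [hIMlen]
  have hpoint : ∀ k (hkl : k < (List.range PrefMat.length).length),
      (msiIM PrefMat.length (msiFW PrefMat.length (msiInit PrefMat Type_)))[k]'(hlen2 ▸ hkl) =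
      (fun i => (List.range PrefMat.length).all (fun j =>
        mget (msiReach (msiAdj PrefMat Type_) PrefMat.length) i j ||
        !(mget (msiReach (msiAdj PrefMat Type_) PrefMat.length) j i)))
        ((List.range PrefMat.length)[k]'hkl) := by
    intro k hkl
    have hk : k < PrefMat.length := by simpa using hkl
    rw [List.getElem_range]
    show (msiIM PrefMat.length (msiFW PrefMat.length (msiInit PrefMat Type_)))[k]'(hlen2 ▸ hkl) =
      (List.range PrefMat.length).all (fun j =>
        mget (msiReach (msiAdj PrefMat Type_) PrefMat.length) k j ||
        !(mget (msiReach (msiAdj PrefMat Type_) PrefMat.length) j k))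
    rw [← List.getD_eq_getElem _ true (hlen2 ▸ hkl)]
    rw [hIMeq, msiIM_outer _ (List.range PrefMat.length) (List.replicate PrefMat.length true) k
      (by simp [hk])]
    have hrepT : (List.replicate PrefMat.length true).getD k true = true := by
      simp [List.getD, hk]
    rw [hrepT]
    exact msiCell PrefMat.length k (Relation.TransGen (msiE PrefMat Type_))
      (mget (msiFW PrefMat.length (msiInit PrefMat Type_)))
      (mget (msiReach (msiAdj PrefMat Type_) PrefMat.length)) hH2 hRc hk
  rw [msiZipFilterMap (List.range PrefMat.length)
    (msiIM PrefMat.length (msiFW PrefMat.length (msiInit PrefMat Type_)))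
    (fun i => (List.range PrefMat.length).all (fun j =>
      mget (msiReach (msiAdj PrefMat Type_) PrefMat.length) i j ||
      !(mget (msiReach (msiAdj PrefMat Type_) PrefMat.length) j i)))
    hlen2 hpoint]
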